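-- pv_equiv track=rewrite | github.com/nehalkarrar/codeSignal | string from the words in arr.py | solution
-- ===== SOURCE A (Python) =====
-- def solution(arr):
--     res = []
--     maxim = max(arr, key=len)
--
--     for word in arr:
--         new = list(word)
--         if len(new) < len(maxim):
--             while len(new) < len(maxim):
--                 new.append(" ")
--         res.append(new)
--
--     tlist = list(zip(*res))
--     new_str = []
--     for el in tlist:
--         for chr in el:
--             new_str.append(chr)
--
--     final = "".join(new_str)
--
--     return final.replace(" ", "")
-- ===== SOURCE B (Python) =====
-- def solution(arr):
--     maxlen = len(max(arr, key=len))
--     return "".join(w[col] for col in range(maxlen)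
--                    for w in arr
--                    if col < len(w) and w[col] != " ")
-- ===== Notes on version B (the rewrite author's own statement) =====
-- stated objective: simpler
-- what changed: B drops A's pad-to-equal-length grid, zip(*rows) transpose and final replace(' ',''): it reads the words column-by-column by direct indexing, keeping word[col] only when the column exists and the character is not a space.
import Mathlib
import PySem

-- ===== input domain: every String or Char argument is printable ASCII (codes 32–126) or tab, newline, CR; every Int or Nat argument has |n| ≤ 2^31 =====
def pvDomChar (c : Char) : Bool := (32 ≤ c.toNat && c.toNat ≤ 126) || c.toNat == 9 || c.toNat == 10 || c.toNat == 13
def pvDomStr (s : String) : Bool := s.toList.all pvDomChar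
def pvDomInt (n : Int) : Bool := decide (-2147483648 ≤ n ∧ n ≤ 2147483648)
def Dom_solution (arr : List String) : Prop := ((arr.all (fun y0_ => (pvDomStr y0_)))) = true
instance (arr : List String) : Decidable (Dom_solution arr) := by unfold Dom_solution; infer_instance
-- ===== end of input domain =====

-- B replaces A's pad-to-grid + zip-transpose + space-stripping replace by a direct
-- column-major indexed read that skips missing cells and spaces (objective: simpler).

-- ===== PORT A =====
-- the 'while len(new) < len(maxim): new.append(" ")' loop
def padLoop (cs : List Char) (n : Nat) : List Char :=
  if cs.length < n then padLoop (cs ++ [' ']) n else cs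
termination_by n - cs.length
decreasing_by simp; omega

-- zip(*res): take the heads of all rows while none is exhausted (exact for zip of lists)
def zipStar (rows : List (List Char)) : List (List Char) :=
  match rows with
  | [] => []
  | r :: rs =>
    if (r :: rs).any (fun x => x.isEmpty) then []
    else ((r :: rs).map (fun x => x.head!)) :: zipStar (r.tail :: rs.map (fun x => x.tail))
termination_by (rows.headD []).length
decreasing_by
  rename_i h
  simp only [List.any_cons, Bool.or_eq_true, List.isEmpty_iff] at h
  push Not at h
  simp [List.length_tail]
  cases r with
  | nil => exact absurd rfl h.1
  | cons a t => simp

def solution (arr : List String) : String :=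
  match PySem.List.max? arr (fun w => PySem.Str.len w) with
  | none => ""   -- Python raises ValueError on empty arr (excluded by Pre_)
  | some maxim =>
    let res := arr.map (fun word =>
      let nw := word.toList
      if nw.length < maxim.toList.length then padLoop nw maxim.toList.length else nw)
    let tlist := zipStar res
    let newStr := tlist.foldl (fun acc el => el.foldl (fun a c => a ++ [c]) acc) []
    PySem.Str.replace (String.ofList newStr) " " ""

-- ===== PORT B =====
def solution_alt (arr : List String) : String :=
  match PySem.List.max? arr (fun w => PySem.Str.len w) with
  | none => ""   -- Python raises ValueError on empty arr (excluded by Pre_)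
  | some m =>
    let maxlen := m.toList.length
    String.ofList ((List.range maxlen).flatMap (fun col =>
      arr.filterMap (fun w => (w.toList[col]?).filter (fun c => c ≠ ' '))))

-- ===== PRECONDITION & SPEC =====
-- Pre_ excludes only the empty list, on which A (and B) raise ValueError from max().
def Pre_solution (arr : List String) : Prop := arr ≠ []
instance (arr : List String) : Decidable (Pre_solution arr) := by unfold Pre_solution; infer_instance
def pvWitness_solution : List String := ["ab", "c d"]

def Spec_solution (arr : List String) (out : String) : Prop := out = solution_alt arr
instance (arr : List String) (out : String) : Decidable (Spec_solution arr out) := by unfold Spec_solution; infer_instance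

-- ===== CLAIM (what is proved, stated in full; the proofs are below) =====
def Claim_equal_solution : Prop := ∀ (arr : List String), Dom_solution arr → Pre_solution arr → Spec_solution arr (solution arr)

-- ===== LEMMAS AND PROOFS =====

theorem padLoop_eq (cs : List Char) (n : Nat) :
    padLoop cs n = cs ++ List.replicate (n - cs.length) ' ' := by
  fun_induction padLoop with
  | case1 cs h ih =>
    rw [ih]
    have h1 : n - cs.length = (n - (cs.length + 1)) + 1 := by omega
    simp [h1, List.replicate_succ]
  | case2 cs h => simp; omega

theorem zipStar_eq (n : Nat) (rows : List (List Char)) (hne : rows ≠ [])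
    (hlen : ∀ r ∈ rows, r.length = n) :
    zipStar rows = (List.range n).map (fun i => rows.map (fun r => r.getD i ' ')) := by
  induction n generalizing rows with
  | zero =>
    obtain ⟨r, rs, rfl⟩ := List.exists_cons_of_ne_nil hne
    rw [zipStar]
    have : r.isEmpty = true := by
      simp [List.length_eq_zero_iff.mp (hlen r (by simp))]
    simp [this]
  | succ n ih =>
    obtain ⟨r, rs, rfl⟩ := List.exists_cons_of_ne_nil hne
    rw [zipStar]
    have hany : (r :: rs).any (fun x => x.isEmpty) = false := by
      simp only [List.any_eq_false]
      intro x hx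
      simp [List.isEmpty_iff, ← List.length_eq_zero_iff, hlen x hx]
    rw [if_neg (by simp [hany])]
    have htl : ∀ x ∈ (r.tail :: rs.map (fun x => x.tail)), x.length = n := by
      intro x hx
      simp only [List.mem_cons, List.mem_map] at hx
      rcases hx with rfl | ⟨y, hy, rfl⟩
      · have := hlen r (by simp); simp [List.length_tail, this]
      · have := hlen y (by simp [hy]); simp [List.length_tail, this]
    rw [ih _ (by simp) htl]
    rw [List.range_succ_eq_map]
    simp only [List.map_cons, List.map_map]
    have hgd : ∀ (x : List Char) (i : Nat), x.tail.getD i ' ' = x.getD (i+1) ' ' := by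
      intro x i; cases x <;> simp
    have hhd : ∀ x ∈ (r :: rs), x.head! = x.getD 0 ' ' := by
      intro x hx
      have : x.length = n + 1 := hlen x hx
      cases x with
      | nil => simp at this
      | cons a t => simp
    congr 1
    · rw [hhd r (by simp)]
      congr 1
      exact List.map_congr_left (fun x hx => hhd x (by simp [hx]))
    · apply List.map_congr_left
      intro i _
      simp only [Function.comp]
      rw [hgd]
      congr 1
      exact List.map_congr_left (fun x _ => hgd x i)

theorem replace_go_space (fuel : Nat) (l acc : List Char) (h : l.length ≤ fuel) :
    PySem.Chars.replace.go [' '] [] fuel l acc = acc.reverse ++ l.filter (fun c => c ≠ ' ') := by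
  induction fuel generalizing l acc with
  | zero =>
    have : l = [] := List.length_eq_zero_iff.mp (Nat.le_zero.mp h)
    subst this; simp [PySem.Chars.replace.go]
  | succ fuel ih =>
    cases l with
    | nil => simp [PySem.Chars.replace.go]
    | cons c t =>
      rw [PySem.Chars.replace.go]
      by_cases hc : c = ' '
      · subst hc
        rw [if_pos (by simp [List.isPrefixOf])]
        simpa using ih t acc (by simpa using Nat.le_of_succ_le_succ h)
      · rw [if_neg (by simp [List.isPrefixOf]; exact fun hh => absurd hh.symm hc)]
        rw [ih t (c :: acc) (by simpa using Nat.le_of_succ_le_succ h)]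
        simp [hc]

theorem replace_space_eq_filter (cs : List Char) :
    PySem.Chars.replace cs [' '] [] = cs.filter (fun c => c ≠ ' ') := by
  rw [PySem.Chars.replace]
  simpa using replace_go_space cs.length cs [] le_rfl

theorem pad_getD (cs : List Char) (k i : Nat) :
    (cs ++ List.replicate k ' ').getD i ' ' = if i < cs.length then cs.getD i ' ' else ' ' := by
  by_cases h : i < cs.length
  · rw [if_pos h]
    simp only [List.getD, List.getElem?_append_left h]
  · simp only [if_neg h, List.getD, List.getElem?_append_right (Nat.le_of_not_lt h),
      List.getElem?_replicate]
    split <;> rfl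

theorem col_filter (arr : List String) (i : Nat) :
    ((arr.map (fun w => if i < w.length then w.toList.getD i ' ' else ' ')).filter
        (fun c => c ≠ ' ')) =
      arr.filterMap (fun w => (w.toList[i]?).filter (fun c => c ≠ ' ')) := by
  induction arr with
  | nil => rfl
  | cons w t ih =>
    rw [List.map_cons, List.filter_cons]
    cases ho : w.toList[i]? with
    | none =>
      have hl : ¬ i < w.length := by
        rw [← String.length_toList]
        exact fun hlt => by simp [List.getElem?_eq_getElem hlt] at ho
      rw [if_neg hl, if_neg (by simp), List.filterMap_cons_none (by simp [ho]), ih]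
    | some c =>
      have hlt : i < w.toList.length := by
        by_contra hh
        rw [List.getElem?_eq_none (Nat.le_of_not_lt hh)] at ho
        cases ho
      have hl : i < w.length := by rwa [String.length_toList] at hlt
      have hgd : w.toList.getD i ' ' = c := by simp [List.getD, ho]
      rw [if_pos hl, hgd]
      by_cases hc : c = ' '
      · rw [if_neg (by simp [hc]), List.filterMap_cons_none (by simp [ho, hc]), ih]
      · rw [if_pos (by simp [hc]), List.filterMap_cons_some (b := c) (by simp [ho, hc]), ih]

set_option maxHeartbeats 1000000 in
theorem solution_spec : Claim_equal_solution := by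
  unfold Claim_equal_solution
  intro arr _ hpre
  unfold Spec_solution
  cases hm : PySem.List.max? arr (fun w => PySem.Str.len w) with
  | none => exact absurd ((PySem.List.max?_eq_none_iff arr _).mp hm) hpre
  | some m =>
    simp only [solution, solution_alt, hm]
    have hb : ∀ w ∈ arr, w.length ≤ m.length := by
      intro w hw
      have := PySem.List.max?_isMax hm w hw
      simp only [PySem.Str.len_eq, String.length_toList] at this
      exact_mod_cast this
    have hrow : arr.map (fun word =>
        let nw := word.toList
        if nw.length < m.toList.length then padLoop nw m.toList.length else nw) =
        arr.map (fun w => w.toList ++ List.replicate (m.length - w.length) ' ') := by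
      apply List.map_congr_left
      intro w hw
      simp only [String.length_toList]
      by_cases h : w.length < m.length
      · rw [if_pos h, padLoop_eq, String.length_toList]
      · rw [if_neg h, Nat.sub_eq_zero_of_le (Nat.le_of_not_lt h), List.replicate_zero,
          List.append_nil]
    rw [hrow]
    have hlens : ∀ r ∈ arr.map (fun w => w.toList ++ List.replicate (m.length - w.length) ' '),
        r.length = m.length := by
      intro r hr
      simp only [List.mem_map] at hr
      obtain ⟨w, hw, rfl⟩ := hr
      have := hb w hw
      simp only [List.length_append, List.length_replicate, String.length_toList]
      omega
    have hz := zipStar_eq m.length (arr.map (fun w => w.toList ++ List.replicate (m.length - w.length) ' '))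
      (fun h => hpre (List.map_eq_nil_iff.mp h)) hlens
    rw [hz]
    simp only [PySem.List.foldl_append_singleton, PySem.List.foldl_append_eq_flatten,
      List.nil_append]
    simp only [PySem.Str.replace]
    congr 1
    rw [String.toList_ofList, show (" " : String).toList = [' '] from rfl,
      show ("" : String).toList = [] from rfl, replace_space_eq_filter, List.filter_flatten,
      List.flatMap_def]
    congr 1
    rw [List.map_map, String.length_toList]
    apply List.map_congr_left
    intro i _
    simp only [Function.comp, List.map_map]
    have hmap : arr.map ((fun r => r.getD i ' ') ∘ fun w => w.toList ++ List.replicate (m.length - w.length) ' ') =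
        arr.map (fun w => if i < w.length then w.toList.getD i ' ' else ' ') := by
      apply List.map_congr_left
      intro w _
      simp only [Function.comp]
      rw [pad_getD, String.length_toList]
    rw [hmap, col_filter]
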